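-- pv_equiv track=rewrite | github.com/patkilleen/fed_learning_n2o_prediction_2024 | common.py | shapesEqual
-- ===== SOURCE A (Python) =====
-- def shapesEqual(shapeA,shapeB,dimIgnoreList=[]):
-- 	#check number of dimensiosn
-- 	if len(shapeA) != len(shapeB):
-- 		return False
--
-- 	#check dimension lengths
-- 	for i in range(len(shapeA)):
--
-- 		ignoreI = False
-- 		#dimension i can be ignored?
-- 		for j in dimIgnoreList:
-- 			if i == j:
-- 				ignoreI=True
-- 				break
-- 		if ignoreI:
-- 			continue
--
-- 		aDim = shapeA[i]
-- 		bDim = shapeB[i]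
--
-- 		if aDim != bDim:
-- 			return False
-- 	return True
-- ===== SOURCE B (Python) =====
-- def shapesEqual(shapeA, shapeB, dimIgnoreList=[]):
--     if len(shapeA) != len(shapeB):
--         return False
--     mismatches = {i for i, (a, b) in enumerate(zip(shapeA, shapeB)) if a != b}
--     return mismatches.issubset(dimIgnoreList)
-- ===== Notes on version B (the rewrite author's own statement) =====
-- stated objective: faster
-- what changed: Inverts the question: instead of scanning index-by-index with an inner linear ignore-list loop and early return, B collects the set of positions where the two shapes disagree and returns whether that mismatch set is a subset of the ignore list (one hashed subset test).
import Mathlib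
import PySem

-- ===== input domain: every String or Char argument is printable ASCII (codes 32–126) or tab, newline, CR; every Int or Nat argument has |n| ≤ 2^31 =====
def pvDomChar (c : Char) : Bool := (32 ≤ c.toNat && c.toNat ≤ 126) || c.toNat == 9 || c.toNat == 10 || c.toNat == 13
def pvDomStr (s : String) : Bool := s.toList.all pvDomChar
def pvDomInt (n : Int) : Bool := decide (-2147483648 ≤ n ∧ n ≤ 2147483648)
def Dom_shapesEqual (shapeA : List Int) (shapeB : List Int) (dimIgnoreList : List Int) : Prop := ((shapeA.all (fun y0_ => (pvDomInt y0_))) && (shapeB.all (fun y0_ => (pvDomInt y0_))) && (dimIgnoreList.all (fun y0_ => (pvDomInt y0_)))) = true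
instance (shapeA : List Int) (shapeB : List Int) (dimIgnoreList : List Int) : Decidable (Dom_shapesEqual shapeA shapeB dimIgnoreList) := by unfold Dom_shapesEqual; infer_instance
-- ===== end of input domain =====

-- B inverts the question: it collects the set of positions where the two shapes disagree
-- and returns whether that mismatch set is contained in the ignore list (one subset test)
-- instead of A's index-by-index scan with an inner ignore-list loop and early return.

-- ===== PORT A =====
-- inner 'for j in dimIgnoreList: if i == j: ignoreI=True; break'
def pyIgnoreLoop (i : Int) : List Int → Bool
  | [] => false
  | j :: rest => if i == j then true else pyIgnoreLoop i rest

-- outer 'for i in range(len(shapeA))': since the length guard already ensured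
-- len(shapeA) == len(shapeB), indexing shapeA[i], shapeB[i] for i = 0,1,… is
-- walking both lists in lockstep with the index counter i (exact on that domain).
def shapesEqualLoop (ign : List Int) : Int → List Int → List Int → Bool
  | _, [], _ => true
  | _, _ :: _, [] => true
  | i, a :: as_, b :: bs =>
    if pyIgnoreLoop i ign then shapesEqualLoop ign (i + 1) as_ bs
    else if a ≠ b then false
    else shapesEqualLoop ign (i + 1) as_ bs

def shapesEqual (shapeA : List Int) (shapeB : List Int) (dimIgnoreList : List Int) : Bool :=
  if shapeA.length ≠ shapeB.length then false
  else shapesEqualLoop dimIgnoreList 0 shapeA shapeB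

-- ===== PORT B =====
-- mismatches = {i for i,(a,b) in enumerate(zip(shapeA,shapeB)) if a != b}; mismatches.issubset(dimIgnoreList)
def shapesEqual_alt (shapeA : List Int) (shapeB : List Int) (dimIgnoreList : List Int) : Bool :=
  if shapeA.length ≠ shapeB.length then false
  else
    let mismatches : PySem.Set Int := PySem.Set.ofList
      (((PySem.List.enumerate (shapeA.zip shapeB) 0).filter
          (fun p => p.2.1 != p.2.2)).map (fun p => p.1))
    PySem.Set.issubset mismatches dimIgnoreList

-- ===== PRECONDITION & SPEC =====
def Spec_shapesEqual (shapeA : List Int) (shapeB : List Int) (dimIgnoreList : List Int) (out : Bool) : Prop := out = shapesEqual_alt shapeA shapeB dimIgnoreList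
instance (shapeA : List Int) (shapeB : List Int) (dimIgnoreList : List Int) (out : Bool) : Decidable (Spec_shapesEqual shapeA shapeB dimIgnoreList out) := by unfold Spec_shapesEqual; infer_instance

-- ===== CLAIM (what is proved, stated in full; the proofs are below) =====
def Claim_equal_shapesEqual : Prop := ∀ (shapeA : List Int) (shapeB : List Int) (dimIgnoreList : List Int), Dom_shapesEqual shapeA shapeB dimIgnoreList → Spec_shapesEqual shapeA shapeB dimIgnoreList (shapesEqual shapeA shapeB dimIgnoreList)

-- ===== LEMMAS AND PROOFS =====

theorem pyIgnoreLoop_eq_contains (i : Int) (l : List Int) :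
    pyIgnoreLoop i l = l.contains i := by
  induction l with
  | nil => rfl
  | cons j rest ih =>
    by_cases h : i = j <;> simp [pyIgnoreLoop, h, ih]

theorem shapesEqualLoop_iff (ign : List Int) (as_ bs : List Int) (i : Int) :
    shapesEqualLoop ign i as_ bs = true ↔
      ∀ p ∈ PySem.List.enumerate (as_.zip bs) i, p.2.1 ≠ p.2.2 → p.1 ∈ ign := by
  induction as_ generalizing bs i with
  | nil => simp [shapesEqualLoop, PySem.List.enumerate_nil]
  | cons a as_ ih =>
    cases bs with
    | nil => simp [shapesEqualLoop, PySem.List.enumerate_nil]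
    | cons b bs =>
      rw [shapesEqualLoop, pyIgnoreLoop_eq_contains]
      simp only [List.zip_cons_cons, PySem.List.enumerate_cons, List.mem_cons]
      by_cases hig : i ∈ ign
      · simp only [List.contains_eq_mem, hig, decide_true, if_true, ih]
        constructor
        · intro h p hp
          rcases hp with rfl | hp
          · intro _; exact hig
          · exact h p hp
        · intro h p hp; exact h p (Or.inr hp)
      · simp only [List.contains_eq_mem, hig, decide_false, Bool.false_eq_true, if_false]
        by_cases hab : a = b
        · simp only [hab, ne_eq, not_true_eq_false, if_false, ih]
          constructor
          · intro h p hp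
            rcases hp with rfl | hp
            · simp
            · exact h p hp
          · intro h p hp; exact h p (Or.inr hp)
        · simp only [ne_eq, hab, not_false_iff, if_true, Bool.false_eq_true, false_iff]
          intro h
          exact hig (h (i, a, b) (Or.inl rfl) hab)

theorem alt_body_iff (ign : List Int) (as_ bs : List Int) :
    PySem.Set.issubset
      (PySem.Set.ofList (((PySem.List.enumerate (as_.zip bs) 0).filter
          (fun p => p.2.1 != p.2.2)).map (fun p => p.1))) ign = true ↔
      ∀ p ∈ PySem.List.enumerate (as_.zip bs) 0, p.2.1 ≠ p.2.2 → p.1 ∈ ign := by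
  rw [PySem.Set.issubset_iff]
  constructor
  · intro h p hp hne
    apply h
    rw [PySem.Set.mem_ofList]
    exact List.mem_map.mpr ⟨p, List.mem_filter.mpr ⟨hp, by simpa using hne⟩, rfl⟩
  · intro h x hx
    rw [PySem.Set.mem_ofList] at hx
    rcases List.mem_map.mp hx with ⟨p, hp, rfl⟩
    rcases List.mem_filter.mp hp with ⟨hmem, hne⟩
    exact h p hmem (by simpa using hne)

-- ===== VERDICT (by name: the statement is the Claim_ definition above) =====
theorem shapesEqual_spec : Claim_equal_shapesEqual := by
  intro shapeA shapeB dimIgnoreList _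
  unfold Spec_shapesEqual shapesEqual shapesEqual_alt
  by_cases hlen : shapeA.length = shapeB.length
  · simp only [hlen, ne_eq, not_true_eq_false, if_false]
    rw [Bool.eq_iff_iff, shapesEqualLoop_iff, alt_body_iff]
  · simp [hlen]
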